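-- pv_equiv track=rewrite | github.com/space-ros/docker | mcdc/mcdc_checker_output_parser.py | parse_summary_for_error
-- ===== SOURCE A (Python) =====
-- checker_codes = [
--                  'clang_parse_failed',
--                  'failed_to_create_bdd',
--                  'invalid_operator_nesting'
--                  'unexpected_node',
--                  'bdd_is_not_tree_like',
--                  'bdd_is_not_tree_like_and_has_too_many_nodes'
--                 ]
--
-- def parse_summary_for_error(lines, error):
--     """
--     Parse and filter the summary output to contain only lines related to the
--     specified MC/DC checker error code
--
--     :lines: Lines from the summary output
--     :error: Error code to look for
--     """
--
--     output = {error: []}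
--     start = False
--     for line in lines:
--         if start:
--             l = line.lstrip()
--             # valid error pointing to a file
--             if l.startswith('file '):
--                 output[error].append(l)
--             # if line is another error code, exit
--             elif any(c in l for c in checker_codes):
--                 break
--             # other output produced for current error code
--             # e.g. Found solutions
--             else:
--                 output[error].append(l)
--         # found start of section for this error code
--         elif error in line:
--             start = True
--     return output
-- ===== SOURCE B (Python) =====
-- checker_codes = [
--                  'clang_parse_failed',
--                  'failed_to_create_bdd',
--                  'invalid_operator_nesting'
--                  'unexpected_node',
--                  'bdd_is_not_tree_like',
--                  'bdd_is_not_tree_like_and_has_too_many_nodes'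
--                 ]
--
-- def parse_summary_for_error(lines, error):
--     # Declarative, index/slice-based: compute all marker indices, materialize the
--     # lstripped tail after the first marker, compute all stop indices, and slice.
--     starts = [i for i, line in enumerate(lines) if error in line]
--     if not starts:
--         return {error: []}
--     tail = [line.lstrip() for line in lines[starts[0] + 1:]]
--     stops = [j for j, l in enumerate(tail)
--              if not l.startswith('file ') and any(c in l for c in checker_codes)]
--     return {error: tail[:stops[0]] if stops else tail}
-- ===== Notes on version B (the rewrite author's own statement) =====
-- stated objective: alternative
-- what changed: Replaces the flag-driven stateful loop with a declarative index/slice pipeline: list-comprehend all marker indices, slice and lstrip the tail after the first one, list-comprehend all stop indices, and slice the tail at the first stop.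
import Mathlib
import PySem

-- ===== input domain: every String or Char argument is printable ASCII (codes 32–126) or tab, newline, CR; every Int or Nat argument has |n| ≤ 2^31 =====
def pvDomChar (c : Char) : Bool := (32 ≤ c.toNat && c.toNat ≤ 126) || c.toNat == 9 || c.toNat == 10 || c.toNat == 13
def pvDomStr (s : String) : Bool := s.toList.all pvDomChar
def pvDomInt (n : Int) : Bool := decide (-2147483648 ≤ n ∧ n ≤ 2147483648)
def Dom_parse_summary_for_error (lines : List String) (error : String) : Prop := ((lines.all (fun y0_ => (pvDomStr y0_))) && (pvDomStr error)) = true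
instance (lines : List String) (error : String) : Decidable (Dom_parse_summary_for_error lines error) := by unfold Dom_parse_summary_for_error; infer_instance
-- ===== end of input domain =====

-- B replaces A's flag-driven stateful loop with a declarative index/slice pipeline
-- (all marker indices, lstripped tail slice, all stop indices, final slice): alternative decomposition.

-- ===== PORT A =====
def checker_codes : List String :=
  ["clang_parse_failed",
   "failed_to_create_bdd",
   "invalid_operator_nestingunexpected_node",  -- missing comma in the Python source concatenates these literals
   "bdd_is_not_tree_like",
   "bdd_is_not_tree_like_and_has_too_many_nodes"]

-- the for-loop of A: state (start, acc); break returns acc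
def parseA_loop (error : String) : List String → Bool → List String → List String
  | [], _, acc => acc
  | line :: rest, start, acc =>
    if start then
      let l := PySem.Str.lstrip line
      if PySem.Str.startswith l "file " then parseA_loop error rest true (acc ++ [l])
      else if checker_codes.any (fun c => PySem.Str.isIn c l) then acc
      else parseA_loop error rest true (acc ++ [l])
    else if PySem.Str.isIn error line then parseA_loop error rest true acc
    else parseA_loop error rest false acc

def parse_summary_for_error (lines : List String) (error : String) : List (String × List String) :=
  [(error, parseA_loop error lines false [])]

-- ===== PORT B =====
-- the stop test of B's second comprehension
def stopLine (l : String) : Bool :=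
  !(PySem.Str.startswith l "file ") && checker_codes.any (fun c => PySem.Str.isIn c l)

def parse_summary_for_error_alt (lines : List String) (error : String) : List (String × List String) :=
  let starts := ((PySem.List.enumerate lines 0).filter (fun p => PySem.Str.isIn error p.2)).map (·.1)
  match starts with
  | [] => [(error, [])]
  | i0 :: _ =>
    let tail := (PySem.List.slice lines (some (i0 + 1)) none).map PySem.Str.lstrip
    let stops := ((PySem.List.enumerate tail 0).filter (fun p => stopLine p.2)).map (·.1)
    match stops with
    | [] => [(error, tail)]
    | j0 :: _ => [(error, PySem.List.slice tail none (some j0))]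

-- ===== PRECONDITION & SPEC =====
def Spec_parse_summary_for_error (lines : List String) (error : String) (out : List (String × List String)) : Prop := out = parse_summary_for_error_alt lines error
instance (lines : List String) (error : String) (out : List (String × List String)) : Decidable (Spec_parse_summary_for_error lines error out) := by unfold Spec_parse_summary_for_error; infer_instance

-- ===== CLAIM (what is proved, stated in full; the proofs are below) =====
def Claim_equal_parse_summary_for_error : Prop := ∀ (lines : List String) (error : String), Dom_parse_summary_for_error lines error → Spec_parse_summary_for_error lines error (parse_summary_for_error lines error)

-- ===== LEMMAS AND PROOFS =====

-- filtered index list of a predicate, as B's comprehensions compute it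
def idxs (f : String → Bool) (ss : List String) : List Int :=
  ((PySem.List.enumerate ss 0).filter (fun p => f p.2)).map (·.1)

theorem idxs_shift (f : String → Bool) (ss : List String) : ∀ s : Int,
    ((PySem.List.enumerate ss s).filter (fun p => f p.2)).map (·.1)
      = (idxs f ss).map (· + s) := by
  induction ss with
  | nil => intro s; simp [idxs, PySem.List.enumerate_nil]
  | cons x xs ih =>
    intro s
    simp only [idxs, PySem.List.enumerate_cons, List.filter_cons]
    by_cases hx : f x
    · simp only [hx, if_pos, List.map_cons]
      rw [ih (s + 1), ih (0 + 1)]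
      simp only [List.map_cons, List.map_map]
      congr 1
      · omega
      · apply List.map_congr_left; intro a _; simp; omega
    · simp only [hx, if_neg, Bool.false_eq_true, not_false_iff]
      rw [ih (s + 1), ih (0 + 1)]
      simp only [List.map_map]
      apply List.map_congr_left; intro a _; simp; omega

theorem idxs_cons (f : String → Bool) (x : String) (xs : List String) :
    idxs f (x :: xs) = (if f x then [(0 : Int)] else []) ++ (idxs f xs).map (· + 1) := by
  simp only [idxs, PySem.List.enumerate_cons, List.filter_cons]
  by_cases hx : f x
  · simp only [hx, if_pos, List.map_cons, List.singleton_append]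
    rw [idxs_shift f xs (0 + 1)]
    simp [idxs]
  · simp only [hx, if_neg, Bool.false_eq_true, not_false_iff, List.nil_append]
    rw [idxs_shift f xs (0 + 1)]
    simp [idxs]

theorem idxs_nonneg (f : String → Bool) : ∀ (ss : List String), ∀ j ∈ idxs f ss, 0 ≤ j := by
  intro ss
  induction ss with
  | nil => simp [idxs, PySem.List.enumerate_nil]
  | cons x xs ih =>
    intro j hj
    rw [idxs_cons] at hj
    rcases List.mem_append.1 hj with h | h
    · split_ifs at h <;> simp_all
    · obtain ⟨a, ha, rfl⟩ := List.mem_map.1 h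
      have := ih a ha; omega

-- A's collecting phase is takeWhile (¬ stopLine) over the lstripped lines
theorem parseA_loop_true (error : String) : ∀ (rest acc : List String),
    parseA_loop error rest true acc
      = acc ++ (rest.map PySem.Str.lstrip).takeWhile (fun l => !stopLine l) := by
  intro rest
  induction rest with
  | nil => intro acc; simp [parseA_loop]
  | cons line tl ih =>
    intro acc
    simp only [parseA_loop, List.map_cons, List.takeWhile]
    rw [if_pos trivial]
    split_ifs with h1 h2
    · rw [ih]
      have hs : stopLine (PySem.Str.lstrip line) = false := by
        unfold stopLine; rw [h1]; simp
      simp [hs]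
    · have hs : stopLine (PySem.Str.lstrip line) = true := by
        unfold stopLine
        rw [Bool.not_eq_true] at h1
        rw [h1, h2]; simp
      simp [hs]
    · rw [ih]
      have hs : stopLine (PySem.Str.lstrip line) = false := by
        unfold stopLine
        rw [Bool.not_eq_true] at h1 h2
        rw [h1, h2]; simp
      simp [hs]

-- B's "slice at the first stop index" is the same takeWhile
theorem slice_first_stop : ∀ (ss : List String),
    (match idxs stopLine ss with
     | [] => ss
     | j0 :: _ => PySem.List.slice ss none (some j0))
      = ss.takeWhile (fun l => !stopLine l) := by
  intro ss
  induction ss with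
  | nil => simp [idxs, PySem.List.enumerate_nil]
  | cons x xs ih =>
    rw [idxs_cons]
    by_cases hx : stopLine x
    · have h0 : PySem.List.slice (x :: xs) none (some (0 : Int)) = [] := by
        rw [PySem.List.slice_to _ (by omega)]; simp
      simp [hx, h0, List.takeWhile]
    · simp only [hx, if_neg, Bool.false_eq_true, not_false_iff, List.nil_append,
        List.takeWhile, Bool.not_false]
      cases h : idxs stopLine xs with
      | nil =>
        rw [h] at ih
        simpa using ih
      | cons j0 t =>
        have hj : 0 ≤ j0 := idxs_nonneg stopLine xs j0 (by simp [h])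
        rw [h] at ih
        have ih' : PySem.List.slice xs none (some j0)
            = xs.takeWhile (fun l => !stopLine l) := ih
        rw [PySem.List.slice_to _ hj] at ih'
        simp only [List.map_cons]
        have e1 : PySem.List.slice (x :: xs) none (some (j0 + 1))
            = x :: List.take j0.toNat xs := by
          rw [PySem.List.slice_to _ (by omega)]
          have : (j0 + 1).toNat = j0.toNat + 1 := by omega
          simp [this]
        show PySem.List.slice (x :: xs) none (some (j0 + 1)) = _
        rw [e1, ih']

-- characterization of B via idxs and takeWhile
theorem alt_char (lines : List String) (error : String) :
    parse_summary_for_error_alt lines error =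
      match idxs (fun l => PySem.Str.isIn error l) lines with
      | [] => [(error, [])]
      | i0 :: _ =>
        [(error, ((PySem.List.slice lines (some (i0 + 1)) none).map
            PySem.Str.lstrip).takeWhile (fun l => !stopLine l))] := by
  unfold parse_summary_for_error_alt
  have hb : ((PySem.List.enumerate lines 0).filter
      (fun p => PySem.Str.isIn error p.2)).map (·.1)
      = idxs (fun l => PySem.Str.isIn error l) lines := rfl
  rw [hb]
  cases h : idxs (fun l => PySem.Str.isIn error l) lines with
  | nil => rfl
  | cons i0 t =>
    simp only []
    have hs : ((PySem.List.enumerate ((PySem.List.slice lines (some (i0 + 1)) none).map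
        PySem.Str.lstrip) 0).filter (fun p => stopLine p.2)).map (·.1)
        = idxs stopLine ((PySem.List.slice lines (some (i0 + 1)) none).map
            PySem.Str.lstrip) := rfl
    rw [hs]
    have := slice_first_stop ((PySem.List.slice lines (some (i0 + 1)) none).map
        PySem.Str.lstrip)
    cases h2 : idxs stopLine ((PySem.List.slice lines (some (i0 + 1)) none).map
        PySem.Str.lstrip) with
    | nil => rw [h2] at this; exact congrArg (fun v => [(error, v)]) this
    | cons j0 t2 => rw [h2] at this; exact congrArg (fun v => [(error, v)]) this

theorem main_eq (error : String) : ∀ (lines : List String),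
    parse_summary_for_error lines error = parse_summary_for_error_alt lines error := by
  intro lines
  induction lines with
  | nil => rfl
  | cons line tl ih =>
    rw [alt_char, idxs_cons]
    by_cases hm : PySem.Str.isIn error line
    · simp only [hm, if_pos, List.singleton_append]
      have hsl : PySem.List.slice (line :: tl) (some ((0 : Int) + 1)) none = tl := by
        rw [PySem.List.slice_from _ (by omega)]
        norm_num
      show [(error, parseA_loop error (line :: tl) false [])] = _
      have hm' : PySem.Chars.isIn error.toList line.toList = true := by
        revert hm; simp [PySem.Str.isIn]
      have hA : parseA_loop error (line :: tl) false [] = parseA_loop error tl true [] := by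
        simp [parseA_loop, hm']
      rw [hA, parseA_loop_true]
      simp only [hsl, List.nil_append]
    · simp only [hm, Bool.false_eq_true, not_false_iff, if_neg, List.nil_append]
      have hm' : PySem.Chars.isIn error.toList line.toList = false := by
        revert hm; simp [PySem.Str.isIn]
      have hA : parse_summary_for_error (line :: tl) error
          = parse_summary_for_error tl error := by
        simp [parse_summary_for_error, parseA_loop, hm']
      rw [hA, ih, alt_char]
      cases h : idxs (fun l => PySem.Str.isIn error l) tl with
      | nil => rfl
      | cons i0 t =>
        have hi : 0 ≤ i0 := idxs_nonneg _ tl i0 (by rw [h]; exact List.mem_cons_self ..)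
        simp only [h, List.map_cons]
        have hsl : PySem.List.slice (line :: tl) (some (i0 + 1 + 1)) none
            = PySem.List.slice tl (some (i0 + 1)) none := by
          rw [PySem.List.slice_from _ (by omega), PySem.List.slice_from _ (by omega)]
          have : (i0 + 1 + 1).toNat = (i0 + 1).toNat + 1 := by omega
          simp [this]
        rw [hsl]

-- ===== VERDICT (by name: the statement is the Claim_ definition above) =====
theorem parse_summary_for_error_spec : Claim_equal_parse_summary_for_error := by
  intro lines error _
  unfold Spec_parse_summary_for_error
  exact main_eq error lines
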